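-- pv_equiv track=rewrite | github.com/henrybhudson/news-wordtiles | main.py | create_prefix_sets
-- ===== SOURCE A (Python) =====
-- SIZE = 4
--
-- def create_prefix_sets(words):
--     word_list = {SIZE - 1: set(), SIZE: set()}
--     prefix_sets = {SIZE - 1: set(), SIZE: set()}
--
--     for line in words:
--         word = line.strip().upper()
--         length = len(word)
--
--         if SIZE - 1 <= length <= SIZE:
--             word_list[length].add(word)
--
--             for i in range(1, length + 1):
--                 prefix_sets[length].add(word[:i])
--
--     return prefix_sets, word_list
-- ===== SOURCE B (Python) =====
-- SIZE = 4
--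
-- def create_prefix_sets(words):
--     # Maintain ONLY the prefix sets, building each kept word's prefixes by
--     # running character accumulation (no slicing, no separate word sets).
--     prefix_sets = {SIZE - 1: set(), SIZE: set()}
--     for line in words:
--         word = line.strip().upper()
--         if len(word) in prefix_sets:
--             acc = ''
--             for ch in word:
--                 acc = acc + ch
--                 prefix_sets[len(word)].add(acc)
--     # Recover the word sets afterwards: a length-L prefix of a length-L word
--     # is the word itself, so the words are exactly the full-length prefixes.
--     word_list = {length: {p for p in ps if len(p) == length}
--                  for length, ps in prefix_sets.items()}
--     return prefix_sets, word_list
-- ===== Notes on version B (the rewrite author's own statement) =====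
-- stated objective: alternative
-- what changed: B maintains only the prefix sets (building each word's prefixes by running character accumulation instead of repeated slicing) and drops the word sets entirely during the scan, recovering them afterwards as the full-length members of each prefix set, since a length-L prefix of a length-L word is the word itself.
import Mathlib
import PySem

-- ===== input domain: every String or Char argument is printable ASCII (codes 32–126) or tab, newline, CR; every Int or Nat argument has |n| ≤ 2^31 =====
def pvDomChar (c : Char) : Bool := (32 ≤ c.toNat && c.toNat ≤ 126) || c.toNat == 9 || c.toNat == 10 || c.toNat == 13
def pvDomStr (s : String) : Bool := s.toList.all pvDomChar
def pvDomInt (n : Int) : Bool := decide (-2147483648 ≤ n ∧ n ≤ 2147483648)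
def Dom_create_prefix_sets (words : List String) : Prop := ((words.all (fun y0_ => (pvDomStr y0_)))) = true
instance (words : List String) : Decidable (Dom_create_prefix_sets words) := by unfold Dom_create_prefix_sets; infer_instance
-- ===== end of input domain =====

-- B maintains only the prefix sets (building each word's prefixes by running character
-- accumulation instead of slicing) and recovers the word sets afterwards as the full-length
-- members of each prefix set (objective: alternative algorithm, not speed).

-- ===== PORT A =====
-- SIZE = 4 in the Python source; SIZE - 1 is written as the literal 3 below.

-- inner loop 'for i in range(1, length + 1): prefix_sets[length].add(word[:i])'
def pvPrefixLoopA (d : PySem.Dict Int (List String)) (length : Int) (word : String) :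
    PySem.Dict Int (List String) :=
  (PySem.List.pyRange 1 (length + 1) 1).foldl
    (fun d i => d.modify length [] (fun s => PySem.Set.add s (PySem.Str.slice word none (some i)))) d

-- body of A's 'for line in words' loop, state = (prefix_sets, word_list)
def pvStepA (st : PySem.Dict Int (List String) × PySem.Dict Int (List String)) (line : String) :
    PySem.Dict Int (List String) × PySem.Dict Int (List String) :=
  let word := PySem.Str.upper (PySem.Str.strip line)
  let length := PySem.Str.len word
  if 3 ≤ length ∧ length ≤ 4 then
    (pvPrefixLoopA st.1 length word,
     st.2.modify length [] (fun s => PySem.Set.add s word))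
  else st

def create_prefix_sets (words : List String) :
    (List (Int × List String)) × (List (Int × List String)) :=
  let init : PySem.Dict Int (List String) := PySem.Dict.mk [(3, []), (4, [])]
  let r := words.foldl pvStepA (init, init)
  (r.1.items, r.2.items)

-- ===== PORT B =====
-- inner loop "acc = ''; for ch in word: acc = acc + ch; prefix_sets[len(word)].add(acc)";
-- the running str 'acc' is modelled as a List Char, the added value is String.ofList acc (exact)
def pvCharLoopB (ps : PySem.Dict Int (List String)) (L : Int) (word : String) :
    PySem.Dict Int (List String) :=
  (word.toList.foldl (fun (st : List Char × PySem.Dict Int (List String)) ch =>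
      let acc := st.1 ++ [ch]
      (acc, st.2.modify L [] (fun s => PySem.Set.add s (String.ofList acc)))) ([], ps)).2

-- body of B's 'for line in words' loop; 'len(word) in prefix_sets' is Dict.contains
def pvStepB (ps : PySem.Dict Int (List String)) (line : String) : PySem.Dict Int (List String) :=
  let word := PySem.Str.upper (PySem.Str.strip line)
  if ps.contains (PySem.Str.len word) then pvCharLoopB ps (PySem.Str.len word) word else ps

def create_prefix_sets_alt (words : List String) :
    (List (Int × List String)) × (List (Int × List String)) :=
  let prefix_sets := words.foldl pvStepB (PySem.Dict.mk [(3, []), (4, [])])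
  -- word_list = {length: {p for p in ps if len(p) == length} for length, ps in prefix_sets.items()}
  let word_list := PySem.Dict.mk (prefix_sets.items.map
    (fun p => (p.1, PySem.Set.ofList (p.2.filter (fun q => PySem.Str.len q == p.1)))))
  (prefix_sets.items, word_list.items)

-- ===== PRECONDITION & SPEC =====
def Spec_create_prefix_sets (words : List String) (out : (List (Int × List String)) × (List (Int × List String))) : Prop := out = create_prefix_sets_alt words
instance (words : List String) (out : (List (Int × List String)) × (List (Int × List String))) : Decidable (Spec_create_prefix_sets words out) := by unfold Spec_create_prefix_sets; infer_instance

-- ===== CLAIM (what is proved, stated in full; the proofs are below) =====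
def Claim_equal_create_prefix_sets : Prop := ∀ (words : List String), Dom_create_prefix_sets words → Spec_create_prefix_sets words (create_prefix_sets words)

-- ===== LEMMAS AND PROOFS =====

-- the normalised word of a line
def pvNorm (line : String) : String := PySem.Str.upper (PySem.Str.strip line)

-- the list of prefixes of a word, shortest first
def pvPrefListC (cs : List Char) : List String :=
  (List.range cs.length).map (fun k => String.ofList (cs.take (k + 1)))

-- canonical inner loop: add all prefixes of w to the set s
def pvPrefAdd (s : List String) (w : String) : List String :=
  (pvPrefListC w.toList).foldl PySem.Set.add s

-- one length component of A's loop body (prefix set, word set)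
def pvStepC (L : Int) (st : List String × List String) (line : String) :
    List String × List String :=
  if PySem.Str.len (pvNorm line) = L then
    (pvPrefAdd st.1 (pvNorm line), PySem.Set.add st.2 (pvNorm line))
  else st

-- one length component of B's loop
def pvStepP (L : Int) (s : List String) (line : String) : List String :=
  if PySem.Str.len (pvNorm line) = L then pvPrefAdd s (pvNorm line) else s

-- one length component of the word sets
def pvKeep (L : Int) (s : List String) (line : String) : List String :=
  if PySem.Str.len (pvNorm line) = L then PySem.Set.add s (pvNorm line) else s

-- Dict.modify on the literal two-key dicts the ports carry
theorem pvModify3 (f : List String → List String) (a b : List String) :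
    (PySem.Dict.mk [((3 : Int), a), (4, b)]).modify 3 [] f = PySem.Dict.mk [(3, f a), (4, b)] := by
  simp [PySem.Dict.modify, PySem.Dict.getD, PySem.Dict.get?, PySem.Dict.insert, PySem.Dict.contains]

theorem pvModify4 (f : List String → List String) (a b : List String) :
    (PySem.Dict.mk [((3 : Int), a), (4, b)]).modify 4 [] f = PySem.Dict.mk [(3, a), (4, f b)] := by
  simp [PySem.Dict.modify, PySem.Dict.getD, PySem.Dict.get?, PySem.Dict.insert, PySem.Dict.contains]

-- a fold of modifies at one key acts on that component only
theorem pvFoldModify3 {α : Type} (l : List α) (g : α → List String → List String) (a b : List String) :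
    l.foldl (fun d i => d.modify 3 [] (g i)) (PySem.Dict.mk [((3 : Int), a), (4, b)])
      = PySem.Dict.mk [(3, l.foldl (fun s i => g i s) a), (4, b)] := by
  induction l generalizing a with
  | nil => rfl
  | cons i l ih => simp only [List.foldl_cons, pvModify3]; exact ih (g i a)

theorem pvFoldModify4 {α : Type} (l : List α) (g : α → List String → List String) (a b : List String) :
    l.foldl (fun d i => d.modify 4 [] (g i)) (PySem.Dict.mk [((3 : Int), a), (4, b)])
      = PySem.Dict.mk [(3, a), (4, l.foldl (fun s i => g i s) b)] := by
  induction l generalizing b with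
  | nil => rfl
  | cons i l ih => simp only [List.foldl_cons, pvModify4]; exact ih (g i b)

-- A's slice inner loop is the canonical prefix fold
theorem pvSliceAddEq (s : List String) (w : String) :
    (PySem.List.pyRange 1 (PySem.Str.len w + 1) 1).foldl
        (fun s i => PySem.Set.add s (PySem.Str.slice w none (some i))) s
      = pvPrefAdd s w := by
  have hlen : PySem.Str.len w = (w.toList.length : Int) := by simp
  have h2 : ((w.toList.length : Int) + 1 - 1).toNat = w.toList.length := by omega
  unfold pvPrefAdd pvPrefListC
  rw [hlen, PySem.List.pyRange_one, h2, List.foldl_map, List.foldl_map]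
  congr 1
  funext x k
  have h1 : (1 : Int) + (k : Int) = ((k + 1 : Nat) : Int) := by push_cast; ring
  rw [h1]
  simp only [PySem.Str.slice, PySem.Chars.slice_eq_listSlice, PySem.List.slice_to_natCast]

-- the same fold with the length written as a variable L = len w
theorem pvSliceAddEq' (s : List String) (w : String) (L : Int) (hL : PySem.Str.len w = L) :
    (PySem.List.pyRange 1 (L + 1) 1).foldl
        (fun s i => PySem.Set.add s (PySem.Str.slice w none (some i))) s
      = pvPrefAdd s w := by
  rw [← hL]; exact pvSliceAddEq s w

-- B's char loop, generalised over the accumulator already built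
theorem pvCharFold (L : Int) (cs : List Char) (pre : List Char) (ps : PySem.Dict Int (List String)) :
    (cs.foldl (fun (st : List Char × PySem.Dict Int (List String)) ch =>
        let acc := st.1 ++ [ch]
        (acc, st.2.modify L [] (fun s => PySem.Set.add s (String.ofList acc)))) (pre, ps)).2
      = ((List.range cs.length).map (fun k => String.ofList (pre ++ cs.take (k + 1)))).foldl
          (fun d x => d.modify L [] (fun s => PySem.Set.add s x)) ps := by
  induction cs generalizing pre ps with
  | nil => rfl
  | cons ch cs ih =>
    simp only [List.foldl_cons, List.length_cons, List.range_succ_eq_map, List.map_cons,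
      List.map_map, List.take_succ_cons, List.take_zero]
    have hmap : (List.range cs.length).map
          ((fun k => String.ofList (pre ++ ch :: List.take k cs)) ∘ Nat.succ)
        = (List.range cs.length).map (fun k => String.ofList ((pre ++ [ch]) ++ cs.take (k + 1))) := by
      apply List.map_congr_left
      intro k hk
      simp only [Function.comp_apply, Nat.succ_eq_add_one]
      rw [List.append_cons]
    rw [hmap]
    exact ih (pre ++ [ch]) _

-- B's char loop is the modify-fold over the canonical prefix list
theorem pvCharLoopEq (ps : PySem.Dict Int (List String)) (L : Int) (w : String) :
    pvCharLoopB ps L w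
      = (pvPrefListC w.toList).foldl
          (fun d x => d.modify L [] (fun s => PySem.Set.add s x)) ps := by
  unfold pvCharLoopB
  rw [pvCharFold]
  unfold pvPrefListC
  simp only [List.nil_append]

-- A's loop splits into the two independent length components
theorem pvAdecomp (words : List String) (a b c d : List String) :
    words.foldl pvStepA (PySem.Dict.mk [((3 : Int), a), (4, b)], PySem.Dict.mk [((3 : Int), c), (4, d)])
      = (PySem.Dict.mk [(3, (words.foldl (pvStepC 3) (a, c)).1), (4, (words.foldl (pvStepC 4) (b, d)).1)],
         PySem.Dict.mk [(3, (words.foldl (pvStepC 3) (a, c)).2), (4, (words.foldl (pvStepC 4) (b, d)).2)]) := by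
  induction words generalizing a b c d with
  | nil => rfl
  | cons w ws ih =>
    simp only [List.foldl_cons]
    by_cases h : 3 ≤ PySem.Str.len (pvNorm w) ∧ PySem.Str.len (pvNorm w) ≤ 4
    · have hL : PySem.Str.len (pvNorm w) = 3 ∨ PySem.Str.len (pvNorm w) = 4 := by omega
      rcases hL with hL | hL
      · have hA : pvStepA (PySem.Dict.mk [((3 : Int), a), (4, b)], PySem.Dict.mk [((3 : Int), c), (4, d)]) w
            = (PySem.Dict.mk [(3, pvPrefAdd a (pvNorm w)), (4, b)],
               PySem.Dict.mk [(3, PySem.Set.add c (pvNorm w)), (4, d)]) := by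
          simp only [pvStepA, pvNorm] at *
          rw [if_pos h, hL, pvModify3]
          simp only [pvPrefixLoopA, pvFoldModify3]
          rw [pvSliceAddEq' a _ 3 hL]
        rw [hA, pvStepC, if_pos hL, pvStepC, if_neg (by omega), ih]
      · have hA : pvStepA (PySem.Dict.mk [((3 : Int), a), (4, b)], PySem.Dict.mk [((3 : Int), c), (4, d)]) w
            = (PySem.Dict.mk [(3, a), (4, pvPrefAdd b (pvNorm w))],
               PySem.Dict.mk [(3, c), (4, PySem.Set.add d (pvNorm w))]) := by
          simp only [pvStepA, pvNorm] at *
          rw [if_pos h, hL, pvModify4]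
          simp only [pvPrefixLoopA, pvFoldModify4]
          rw [pvSliceAddEq' b _ 4 hL]
        rw [hA, pvStepC, if_neg (by omega), pvStepC, if_pos hL, ih]
    · have hA : pvStepA (PySem.Dict.mk [((3 : Int), a), (4, b)], PySem.Dict.mk [((3 : Int), c), (4, d)]) w
          = (PySem.Dict.mk [((3 : Int), a), (4, b)], PySem.Dict.mk [((3 : Int), c), (4, d)]) := by
        simp only [pvStepA, pvNorm] at *
        rw [if_neg h]
      rw [hA, pvStepC, if_neg (by omega), pvStepC, if_neg (by omega), ih]

-- contains on the literal two-key dict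
theorem pvContains3 (a b : List String) :
    (PySem.Dict.mk [((3 : Int), a), (4, b)]).contains 3 = true := by
  simp [PySem.Dict.contains_mk]

theorem pvContains4 (a b : List String) :
    (PySem.Dict.mk [((3 : Int), a), (4, b)]).contains 4 = true := by
  simp [PySem.Dict.contains_mk]

theorem pvContainsNo (a b : List String) (n : Int) (h3 : ¬ n = 3) (h4 : ¬ n = 4) :
    (PySem.Dict.mk [((3 : Int), a), (4, b)]).contains n = false := by
  simp only [PySem.Dict.contains_mk, List.any_cons, List.any_nil, Bool.or_false,
    Bool.or_eq_false_iff, beq_eq_false_iff_ne, ne_eq]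
  exact ⟨fun h => h3 h.symm, fun h => h4 h.symm⟩

-- B's loop splits the same way
theorem pvBdecomp (words : List String) (a b : List String) :
    words.foldl pvStepB (PySem.Dict.mk [((3 : Int), a), (4, b)])
      = PySem.Dict.mk [(3, words.foldl (pvStepP 3) a), (4, words.foldl (pvStepP 4) b)] := by
  induction words generalizing a b with
  | nil => rfl
  | cons w ws ih =>
    simp only [List.foldl_cons]
    by_cases h3 : PySem.Str.len (pvNorm w) = 3
    · have hB : pvStepB (PySem.Dict.mk [((3 : Int), a), (4, b)]) w
          = PySem.Dict.mk [(3, pvPrefAdd a (pvNorm w)), (4, b)] := by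
        simp only [pvStepB, pvNorm] at *
        rw [h3]
        simp only [pvContains3]
        rw [if_pos trivial, pvCharLoopEq, pvFoldModify3]
        rfl
      rw [hB, pvStepP, if_pos h3, pvStepP, if_neg (by omega), ih]
    · by_cases h4 : PySem.Str.len (pvNorm w) = 4
      · have hB : pvStepB (PySem.Dict.mk [((3 : Int), a), (4, b)]) w
            = PySem.Dict.mk [(3, a), (4, pvPrefAdd b (pvNorm w))] := by
          simp only [pvStepB, pvNorm] at *
          rw [h4]
          simp only [pvContains4]
          rw [if_pos trivial, pvCharLoopEq, pvFoldModify4]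
          rfl
        rw [hB, pvStepP, if_neg h3, pvStepP, if_pos h4, ih]
      · have hB : pvStepB (PySem.Dict.mk [((3 : Int), a), (4, b)]) w
            = PySem.Dict.mk [((3 : Int), a), (4, b)] := by
          simp only [pvStepB, pvNorm] at *
          simp only [pvContainsNo a b _ h3 h4]
          rw [if_neg (by simp)]
        rw [hB, pvStepP, if_neg h3, pvStepP, if_neg h4, ih]

-- the pair fold of pvStepC splits into independent component folds
theorem pvPairSplit (L : Int) (words : List String) (p s : List String) :
    words.foldl (pvStepC L) (p, s) = (words.foldl (pvStepP L) p, words.foldl (pvKeep L) s) := by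
  induction words generalizing p s with
  | nil => rfl
  | cons w ws ih =>
    simp only [List.foldl_cons, pvStepC, pvStepP, pvKeep]
    by_cases h : PySem.Str.len (pvNorm w) = L
    · rw [if_pos h, if_pos h, if_pos h]; exact ih _ _
    · rw [if_neg h, if_neg h, if_neg h]; exact ih _ _

-- filter distributes over Set.add
theorem pvFilterAdd (s : List String) (x : String) (p : String → Bool) :
    (PySem.Set.add s x).filter p
      = if p x then PySem.Set.add (s.filter p) x else s.filter p := by
  by_cases hx : x ∈ s
  · rw [PySem.Set.add_of_mem hx]
    by_cases hp : p x
    · rw [if_pos hp, PySem.Set.add_of_mem (List.mem_filter.mpr ⟨hx, hp⟩)]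
    · rw [if_neg hp]
  · rw [PySem.Set.add_of_not_mem hx, List.filter_append]
    by_cases hp : p x
    · rw [if_pos hp, PySem.Set.add_of_not_mem (fun h => hx (List.mem_filter.mp h).1)]
      simp [hp]
    · rw [if_neg hp]; simp [hp]

-- filter distributes over a fold of Set.add
theorem pvFilterFoldAdd (l : List String) (s : List String) (p : String → Bool) :
    (l.foldl PySem.Set.add s).filter p = (l.filter p).foldl PySem.Set.add (s.filter p) := by
  induction l generalizing s with
  | nil => rfl
  | cons x l ih =>
    simp only [List.foldl_cons, List.filter_cons]
    rw [ih, pvFilterAdd]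
    by_cases hp : p x
    · rw [if_pos hp]; simp [hp]
    · rw [if_neg hp]; simp [hp]

-- the only full-length prefix of a length-3/4 word is the word itself
theorem pvPrefFilter (cs : List Char) (h : cs.length = 3 ∨ cs.length = 4) :
    (pvPrefListC cs).filter (fun q => PySem.Str.len q == (cs.length : Int)) = [String.ofList cs] := by
  rcases cs with _ | ⟨a, _ | ⟨b, _ | ⟨c, _ | ⟨d, _ | ⟨e, t⟩⟩⟩⟩⟩ <;>
    simp_all [pvPrefListC, List.range_succ]

-- a fold of Set.add preserves Nodup
theorem pvNodupFoldAdd (l : List String) (s : List String) (h : s.Nodup) :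
    (l.foldl PySem.Set.add s).Nodup := by
  induction l generalizing s with
  | nil => exact h
  | cons x l ih => exact ih _ (PySem.Set.nodup_add _ _ h)

theorem pvNodupP (L : Int) (words : List String) (s : List String) (h : s.Nodup) :
    (words.foldl (pvStepP L) s).Nodup := by
  induction words generalizing s with
  | nil => exact h
  | cons w ws ih =>
    simp only [List.foldl_cons, pvStepP]
    split
    · exact ih _ (pvNodupFoldAdd _ _ h)
    · exact ih _ h

-- CORE: filtering the prefix fold by full length yields the word fold
theorem pvFilterInv (L : Int) (h34 : L = 3 ∨ L = 4) (words : List String) (s : List String) :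
    (words.foldl (pvStepP L) s).filter (fun q => PySem.Str.len q == L)
      = words.foldl (pvKeep L) (s.filter (fun q => PySem.Str.len q == L)) := by
  induction words generalizing s with
  | nil => rfl
  | cons w ws ih =>
    simp only [List.foldl_cons, pvStepP, pvKeep]
    by_cases h : PySem.Str.len (pvNorm w) = L
    · rw [if_pos h, if_pos h, ih]
      have hstep : (pvPrefAdd s (pvNorm w)).filter (fun q => PySem.Str.len q == L)
          = PySem.Set.add (s.filter (fun q => PySem.Str.len q == L)) (pvNorm w) := by
        unfold pvPrefAdd
        rw [pvFilterFoldAdd]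
        have hcs : (((pvNorm w).toList.length : Int)) = L := by
          rw [← h]; simp only [PySem.Str.len_eq, String.length_toList]
        rw [← hcs]
        rw [pvPrefFilter ((pvNorm w).toList) (by rcases h34 with h34 | h34 <;> rw [h34] at hcs <;> [left; right] <;> exact_mod_cast hcs)]
        simp only [List.foldl_cons, List.foldl_nil, String.ofList_toList]
      rw [hstep]
    · rw [if_neg h, if_neg h, ih]

-- ===== VERDICT (by name: the statement is the Claim_ definition above) =====
-- the recovered word set equals A's word set
theorem pvWordComp (L : Int) (h34 : L = 3 ∨ L = 4) (words : List String) :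
    PySem.Set.ofList ((words.foldl (pvStepP L) []).filter (fun q => PySem.Str.len q == L))
      = words.foldl (pvKeep L) [] := by
  rw [PySem.Set.ofList_eq_self_of_nodup _ ((pvNodupP L words [] List.nodup_nil).filter _)]
  have := pvFilterInv L h34 words []
  simpa using this

theorem create_prefix_sets_spec : Claim_equal_create_prefix_sets := by
  unfold Claim_equal_create_prefix_sets
  intro words _
  unfold Spec_create_prefix_sets create_prefix_sets create_prefix_sets_alt
  simp only [pvAdecomp, pvBdecomp, pvPairSplit, List.map_cons, List.map_nil]
  rw [pvWordComp 3 (Or.inl rfl) words, pvWordComp 4 (Or.inr rfl) words]
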